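-- pv_equiv track=rewrite | github.com/Bobby-Ling/MED_IO_Schedule | lib/scikit-opt/read_lkh_result.py | rotate_tour_list
-- ===== SOURCE A (Python) =====
-- def rotate_tour_list(tour_list):
--     dimension = len(tour_list)
--     # Step 1: Remove the point with value DIMENSION-1
--     modified_list = [x for x in tour_list if x != dimension - 1]
--
--     # Step 2: Rotate the list to start with the value DIMENSION
--     if dimension in modified_list:
--         index = modified_list.index(dimension)
--         rotated_list = modified_list[index:] + modified_list[:index]
--     else:
--         rotated_list = modified_list  # If DIMENSION is not in the list, return as is
--
--     return rotated_list
-- ===== SOURCE B (Python) =====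
-- def rotate_tour_list(tour_list):
--     dimension = len(tour_list)
--     seen = False
--     before = []
--     after = []
--     for x in tour_list:
--         if x == dimension - 1:
--             continue
--         if seen:
--             after.append(x)
--         elif x == dimension:
--             seen = True
--             after.append(x)
--         else:
--             before.append(x)
--     return after + before
-- ===== Notes on version B (the rewrite author's own statement) =====
-- stated objective: alternative
-- what changed: Replaces filter + membership test + .index + two slices (multiple passes) with one fused pass that partitions kept elements into 'before'/'after' buckets switched by a seen-flag at the first occurrence of dimension.
import Mathlib
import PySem

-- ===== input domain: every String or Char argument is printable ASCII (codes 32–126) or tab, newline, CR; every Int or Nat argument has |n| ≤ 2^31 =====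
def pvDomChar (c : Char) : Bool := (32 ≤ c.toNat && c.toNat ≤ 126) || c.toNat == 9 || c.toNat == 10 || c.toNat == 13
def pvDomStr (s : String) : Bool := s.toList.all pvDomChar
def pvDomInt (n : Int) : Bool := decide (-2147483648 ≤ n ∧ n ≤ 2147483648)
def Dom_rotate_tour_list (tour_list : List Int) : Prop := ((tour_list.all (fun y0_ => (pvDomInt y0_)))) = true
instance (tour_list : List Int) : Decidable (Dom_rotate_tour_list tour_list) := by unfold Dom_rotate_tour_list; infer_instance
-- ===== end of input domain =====

-- B replaces A's filter + membership + .index + two slices with one fused pass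
-- partitioning kept elements into before/after buckets (alternative decomposition, same cost).

-- ===== PORT A =====
def rotate_tour_list (tour_list : List Int) : List Int :=
  let dimension : Int := tour_list.length
  -- Step 1: remove the point with value dimension-1
  let modified_list := tour_list.filter (fun x => x != dimension - 1)
  -- Step 2: rotate the list to start with the value dimension
  if modified_list.contains dimension then
    let index : Nat := (PySem.List.index? modified_list dimension).getD 0
    PySem.List.slice modified_list (some (index : Int)) none
      ++ PySem.List.slice modified_list none (some (index : Int))
  else
    modified_list

-- ===== PORT B =====
-- loop body of B's single for-loop; state = (seen, before, after)
def rtlAltStep (dimension : Int) (s : Bool × List Int × List Int) (x : Int) :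
    Bool × List Int × List Int :=
  if x == dimension - 1 then s
  else if s.1 then (s.1, s.2.1, s.2.2 ++ [x])
  else if x == dimension then (true, s.2.1, s.2.2 ++ [x])
  else (s.1, s.2.1 ++ [x], s.2.2)

def rotate_tour_list_alt (tour_list : List Int) : List Int :=
  let dimension : Int := tour_list.length
  let r := tour_list.foldl (rtlAltStep dimension) (false, [], [])
  r.2.2 ++ r.2.1

-- ===== PRECONDITION & SPEC =====
def Spec_rotate_tour_list (tour_list : List Int) (out : List Int) : Prop := out = rotate_tour_list_alt tour_list
instance (tour_list : List Int) (out : List Int) : Decidable (Spec_rotate_tour_list tour_list out) := by unfold Spec_rotate_tour_list; infer_instance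

-- ===== CLAIM (what is proved, stated in full; the proofs are below) =====
def Claim_equal_rotate_tour_list : Prop := ∀ (tour_list : List Int), Dom_rotate_tour_list tour_list → Spec_rotate_tour_list tour_list (rotate_tour_list tour_list)

-- ===== LEMMAS AND PROOFS =====

-- the fold over the raw list equals the fold over the kept (≠ d-1) elements
theorem rtl_foldl_filter (d : Int) (l : List Int) (s : Bool × List Int × List Int) :
    l.foldl (rtlAltStep d) s = (l.filter (fun x => x != d - 1)).foldl (rtlAltStep d) s := by
  induction l generalizing s with
  | nil => rfl
  | cons x xs ih =>
    rw [List.foldl_cons, ih]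
    by_cases hx : x = d - 1
    · simp [hx, rtlAltStep]
    · have hb : (x == d - 1) = false := by simpa using hx
      simp [hx, List.foldl_cons]

-- once seen, everything (not skipped) is appended to 'after'
theorem rtl_foldl_true (d : Int) (l : List Int) (h : ∀ x ∈ l, x ≠ d - 1)
    (b a : List Int) :
    l.foldl (rtlAltStep d) (true, b, a) = (true, b, a ++ l) := by
  induction l generalizing a with
  | nil => simp
  | cons x xs ih =>
    have hx : (x == d - 1) = false := by
      simpa using h x (List.mem_cons_self ..)
    simp only [List.foldl_cons, rtlAltStep, hx]
    simp only [if_true, Bool.false_eq_true, if_false]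
    rw [ih (fun y hy => h y (List.mem_cons_of_mem _ hy))]
    simp

-- characterisation of the full fold from the initial state, via the first index of d
theorem rtl_foldl_main (d : Int) (l : List Int) (h : ∀ x ∈ l, x ≠ d - 1) (b : List Int) :
    l.foldl (rtlAltStep d) (false, b, []) =
      match PySem.List.index? l d with
      | some i => (true, b ++ l.take i, l.drop i)
      | none => (false, b ++ l, []) := by
  induction l generalizing b with
  | nil => simp [PySem.List.index?]
  | cons x xs ih =>
    have hx : (x == d - 1) = false := by
      simpa using h x (List.mem_cons_self ..)
    have hxs : ∀ y ∈ xs, y ≠ d - 1 := fun y hy => h y (List.mem_cons_of_mem _ hy)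
    by_cases hxd : x = d
    · have hdd : (d == d - 1) = false := hxd ▸ hx
      rw [hxd, PySem.List.index?_cons_self]
      simp only [List.foldl_cons, rtlAltStep, hdd]
      simp only [Bool.false_eq_true, if_false, beq_self_eq_true, if_true]
      rw [rtl_foldl_true d xs hxs]
      simp
    · have hxb : (x == d) = false := by simpa using hxd
      rw [PySem.List.index?_cons_of_ne _ hxd]
      simp only [List.foldl_cons, rtlAltStep, hx, hxb]
      simp only [Bool.false_eq_true, if_false]
      rw [ih hxs (b ++ [x])]
      cases hI : PySem.List.index? xs d with
      | none => simp
      | some i => simp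

-- ===== VERDICT (by name: the statement is the Claim_ definition above) =====
theorem rotate_tour_list_spec : Claim_equal_rotate_tour_list := by
  intro tour_list _
  unfold Spec_rotate_tour_list
  simp only [rotate_tour_list, rotate_tour_list_alt]
  set d : Int := (tour_list.length : Int) with hd
  set F := tour_list.filter (fun x => x != d - 1) with hF
  have hFne : ∀ x ∈ F, x ≠ d - 1 := by
    intro x hx
    have := List.of_mem_filter hx
    simpa using this
  rw [rtl_foldl_filter, ← hF, rtl_foldl_main d F hFne]
  cases hI : PySem.List.index? F d with
  | none =>
    have hmem : d ∉ F := (PySem.List.index?_eq_none_iff ..).mp hI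
    have hc : F.contains d = false := by simpa using hmem
    simp
    intro h'
    exact absurd h' hmem
  | some i =>
    have hmem : d ∈ F := (PySem.List.index?_isSome_iff F d).mp (by rw [hI]; rfl)
    have hc : F.contains d = true := by simpa using hmem
    simp only [hc, if_true, Option.getD_some]
    rw [PySem.List.slice_from_natCast, PySem.List.slice_to_natCast]
    simp
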